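-- pv_equiv track=rewrite | github.com/isa43461/ADA | hw01/backpack.py | camping
-- ===== SOURCE A (Python) =====
-- def camping(n,k,dist,mid):
--   i, j = 0,0
--   acum = 0
--   while(i!=n and j<=k):
--     if(acum+dist[i] <= mid):
--       acum += dist[i]
--       i+=1
--     else:
--       acum = 0
--       j+=1
--   return j<=k
-- ===== SOURCE B (Python) =====
-- def camping(n, k, dist, mid):
--     def cut(xs):
--         # length of the longest prefix of xs whose running sum stays <= mid
--         s = 0
--         for i, x in enumerate(xs):
--             s += x
--             if s > mid:
--                 return i
--         return len(xs)
--
--     def nsegs(xs):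
--         # number of greedy segments of xs, or None if a segment cannot start
--         if not xs:
--             return 0
--         c = cut(xs)
--         if c == 0:
--             return None
--         rest = nsegs(xs[c:])
--         return None if rest is None else 1 + rest
--
--     s = nsegs(dist[:n])
--     return s is not None and max(s - 1, 0) <= k
-- ===== Notes on version B (the rewrite author's own statement) =====
-- stated objective: alternative
-- what changed: Replaces A's flat two-counter retry while-loop (which revisits the same element after a reset and signals an unplaceable element by spinning j past k) with a recursive segment-peeling decomposition: a helper cuts the longest prefix whose running sum fits into mid, nsegs recurses on the remaining suffix to count segments (None if a segment cannot start), and the result compares the boundary count max(nsegs-1,0) with k.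
-- outside the precondition, e.g. on camping(-1, 0, [9], 3): A returns False, B returns True; on camping(2, 5, [1], 3): A raises IndexError, B returns True
import Mathlib
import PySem

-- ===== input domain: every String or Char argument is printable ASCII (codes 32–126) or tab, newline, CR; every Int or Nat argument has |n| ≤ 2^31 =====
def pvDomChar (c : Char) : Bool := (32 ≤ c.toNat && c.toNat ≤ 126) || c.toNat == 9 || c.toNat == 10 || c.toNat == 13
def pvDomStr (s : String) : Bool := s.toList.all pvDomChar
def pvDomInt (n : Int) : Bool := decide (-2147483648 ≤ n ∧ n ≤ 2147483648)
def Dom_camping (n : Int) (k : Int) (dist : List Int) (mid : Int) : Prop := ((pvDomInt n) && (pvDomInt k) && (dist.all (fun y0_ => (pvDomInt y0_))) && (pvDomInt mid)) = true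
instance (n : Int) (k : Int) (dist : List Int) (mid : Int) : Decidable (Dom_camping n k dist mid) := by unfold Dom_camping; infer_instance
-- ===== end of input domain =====

-- B replaces A's two-counter retry while-loop by a recursive segment-peeling
-- decomposition (cut the longest fitting prefix, recurse on the suffix, count
-- segments) — objective: alternative algorithmic structure, same cost.


-- ===== PORT A =====
-- the while-loop of A: state (i, j, acum); i kept as a Nat (it starts at 0 and only
-- increases by 1), compared with n as an Int exactly as Python compares i != n.
-- On an out-of-range index (Python IndexError, outside Pre_) it returns false.
def campingLoop (n k : Int) (dist : List Int) (mid : Int) (i : Nat) (j acum : Int) : Bool :=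
  if _h1 : (i : Int) = n then decide (j ≤ k)
  else if _h2 : ¬ j ≤ k then decide (j ≤ k)
  else
    match _h3 : PySem.List.pyGet? dist (i : Int) with
    | none => false   -- IndexError: A raises here, excluded by Pre_camping
    | some d =>
      if acum + d ≤ mid then campingLoop n k dist mid (i + 1) j (acum + d)
      else campingLoop n k dist mid i (j + 1) 0
termination_by (dist.length - i, (k + 1 - j).toNat)
decreasing_by
  · have hi : i < dist.length := by
      by_contra hge
      have : PySem.List.pyGet? dist (i : Int) = dist[i]? := PySem.List.pyGet?_natCast dist i
      rw [this, List.getElem?_eq_none (by omega)] at _h3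
      exact absurd _h3 (by simp)
    exact Prod.Lex.left _ _ (by omega)
  · exact Prod.Lex.right _ (by omega)

def camping (n : Int) (k : Int) (dist : List Int) (mid : Int) : Bool :=
  campingLoop n k dist mid 0 0 0

-- ===== PORT B =====
-- cut(xs): the for-loop over enumerate(xs); i is the running index, s the running sum
def cutLoop (mid s : Int) (i : Nat) : List Int → Nat
  | [] => i                 -- for-loop finished: return len(xs) (= i here)
  | x :: r => if s + x > mid then i else cutLoop mid (s + x) (i + 1) r

-- nsegs(xs): recursion peeling the longest fitting prefix; xs[c:] with c ≥ 0 is List.drop c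
def nsegs (mid : Int) (xs : List Int) : Option Int :=
  if _h : xs.isEmpty then some 0
  else
    let c := cutLoop mid 0 0 xs
    if _hc : c = 0 then none
    else
      match nsegs mid (xs.drop c) with
      | none => none
      | some r => some (1 + r)
termination_by xs.length
decreasing_by
  have hx : xs ≠ [] := by simpa using _h
  have : 0 < xs.length := List.length_pos_iff.mpr hx
  simp only [List.length_drop]
  omega

def camping_alt (n : Int) (k : Int) (dist : List Int) (mid : Int) : Bool :=
  match nsegs mid (PySem.List.slice dist none (some n)) with
  | none => false                       -- s is None
  | some s => decide (max (s - 1) 0 ≤ k)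

-- ===== PRECONDITION & SPEC =====
-- Pre_ admits the natural domain 0 ≤ n ≤ len(dist), plus every input with k < 0 (where
-- A returns False without touching the list). It excludes n outside [0, len(dist)] with
-- k ≥ 0: there A's index i can run past the list and raise IndexError, and when A does
-- return before that the value reflects the accidental scan of indices the caller never
-- asked for, while B just reads the slice dist[:n].
def Pre_camping (n : Int) (k : Int) (dist : List Int) (mid : Int) : Prop :=
  (0 ≤ n ∧ n ≤ dist.length) ∨ k < 0
instance (n : Int) (k : Int) (dist : List Int) (mid : Int) : Decidable (Pre_camping n k dist mid) := by unfold Pre_camping; infer_instance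
def pvWitness_camping : Int × Int × List Int × Int := (3, 1, [1, 2, 3], 3)

def Spec_camping (n : Int) (k : Int) (dist : List Int) (mid : Int) (out : Bool) : Prop := out = camping_alt n k dist mid
instance (n : Int) (k : Int) (dist : List Int) (mid : Int) (out : Bool) : Decidable (Spec_camping n k dist mid out) := by unfold Spec_camping; infer_instance

-- ===== CLAIM (what is proved, stated in full; the proofs are below) =====
def Claim_equal_camping : Prop := ∀ (n : Int) (k : Int) (dist : List Int) (mid : Int), Dom_camping n k dist mid → Pre_camping n k dist mid → Spec_camping n k dist mid (camping n k dist mid)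

-- ===== LEMMAS AND PROOFS =====

-- proof-side reference recursion: A's loop rephrased over the prefix list, taking each
-- element once (the bridge between the two ports)
def aRef (k mid : Int) (acum j : Int) : List Int → Bool
  | [] => decide (j ≤ k)
  | d :: rest =>
    if acum + d ≤ mid then aRef k mid (acum + d) j rest
    else if d > mid then false
    else aRef k mid d (j + 1) rest

-- proof-side boundary counter: number of segment boundaries B's greedy scan introduces
-- after state acum, or none if an unplaceable element is hit
def bcount (mid acum : Int) : List Int → Option Int
  | [] => some 0
  | d :: r =>
    if acum + d ≤ mid then bcount mid (acum + d) r
    else if d > mid then none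
    else (bcount mid d r).map (· + 1)

theorem aRef_false_of_gt (k mid : Int) (l : List Int) :
    ∀ (acum j : Int), k < j → aRef k mid acum j l = false := by
  induction l with
  | nil => intro acum j h; simp [aRef]; omega
  | cons d rest ih =>
    intro acum j h
    simp only [aRef]
    split_ifs with h1 h2
    · exact ih _ _ h
    · rfl
    · exact ih _ _ (by omega)

-- the core invariant: A's loop from position i equals aRef on the rest of the prefix
theorem campingLoop_eq_aRef (n k : Int) (dist : List Int) (mid : Int)
    (hn : 0 ≤ n) (hnl : n ≤ dist.length) :
    ∀ (i : Nat) (j acum : Int), i ≤ n.toNat →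
      campingLoop n k dist mid i j acum =
        aRef k mid acum j ((dist.take n.toNat).drop i) := by
  intro i j acum
  induction i, j, acum using campingLoop.induct n k dist mid with
  | case1 i j acum h1 =>
    intro hi
    have : i = n.toNat := by omega
    subst this
    rw [List.drop_eq_nil_of_le (by simp)]
    rw [campingLoop, dif_pos (show ((n.toNat : Int)) = n by omega)]
    rfl
  | case2 i j acum h1 h2 =>
    intro hi
    rw [campingLoop, dif_neg h1, dif_pos h2,
      aRef_false_of_gt k mid _ acum j (by omega)]
    exact decide_eq_false h2
  | case3 i j acum h1 h2 h3 =>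
    intro hi
    exfalso
    rw [PySem.List.pyGet?_natCast, List.getElem?_eq_getElem (by omega)] at h3
    exact absurd h3 (by simp)
  | case4 i j acum h1 h2 d h3 h4 ih =>
    intro hi
    have hlt : i < n.toNat := by omega
    have hgd : dist[i] = d := by
      rw [PySem.List.pyGet?_natCast, List.getElem?_eq_getElem (by omega)] at h3
      exact Option.some.inj h3
    have hd : ((dist.take n.toNat).drop i) = d :: ((dist.take n.toNat).drop (i + 1)) := by
      have hlen : i < (dist.take n.toNat).length := by simp; omega
      rw [List.drop_eq_getElem_cons hlen]
      congr 1
      simpa [List.getElem_take] using hgd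
    rw [campingLoop]
    simp only [dif_neg h1, dif_neg h2]
    split
    · next heq => rw [h3] at heq; exact absurd heq (by simp)
    · next d' heq =>
      rw [h3] at heq
      cases Option.some.inj heq
      rw [if_pos h4, ih hlt, hd, aRef, if_pos h4]
  | case5 i j acum h1 h2 d h3 h4 ih =>
    intro hi
    have hlt : i < n.toNat := by omega
    have hgd : dist[i] = d := by
      rw [PySem.List.pyGet?_natCast, List.getElem?_eq_getElem (by omega)] at h3
      exact Option.some.inj h3
    have hd : ((dist.take n.toNat).drop i) = d :: ((dist.take n.toNat).drop (i + 1)) := by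
      have hlen : i < (dist.take n.toNat).length := by simp; omega
      rw [List.drop_eq_getElem_cons hlen]
      congr 1
      simpa [List.getElem_take] using hgd
    rw [campingLoop]
    simp only [dif_neg h1, dif_neg h2]
    split
    · next heq => rw [h3] at heq; exact absurd heq (by simp)
    · next d' heq =>
      rw [h3] at heq
      cases Option.some.inj heq
      rw [if_neg h4, ih hi, hd]
      simp only [aRef, zero_add, gt_iff_lt]
      by_cases hdm : d ≤ mid
      · rw [if_pos hdm, if_neg h4, if_neg (show ¬ mid < d by omega)]
      · rw [if_neg hdm, if_neg h4, if_pos (show mid < d by omega)]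
        rw [if_pos (show mid < d by omega)]

-- aRef in terms of the boundary counter
theorem aRef_eq_bcount (k mid : Int) (l : List Int) :
    ∀ (acum j : Int), aRef k mid acum j l =
      match bcount mid acum l with
      | none => false
      | some b => decide (j + b ≤ k) := by
  induction l with
  | nil => intro acum j; simp [aRef, bcount]
  | cons d r ih =>
    intro acum j
    simp only [aRef, bcount]
    split_ifs with h1 h2
    · exact ih _ _
    · rfl
    · rw [ih d (j + 1)]
      cases hb : bcount mid d r with
      | none => simp
      | some b => simp; constructor <;> intro <;> omega

theorem bcount_nonneg (mid : Int) (l : List Int) :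
    ∀ (acum b : Int), bcount mid acum l = some b → 0 ≤ b := by
  induction l with
  | nil => intro acum b h; simp [bcount] at h; omega
  | cons d r ih =>
    intro acum b h
    simp only [bcount] at h
    split_ifs at h with h1 h2
    · exact ih _ _ h
    · cases hb : bcount mid d r with
      | none => rw [hb] at h; simp at h
      | some b' => rw [hb] at h; simp at h; have := ih _ _ hb; omega

-- index-shift normal form of the cut loop
theorem cutLoop_shift (mid : Int) (l : List Int) :
    ∀ (s : Int) (i : Nat), cutLoop mid s i l = i + cutLoop mid s 0 l := by
  induction l with
  | nil => intro s i; simp [cutLoop]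
  | cons x r ih =>
    intro s i
    simp only [cutLoop]
    split_ifs with h
    · simp
    · rw [ih (s + x) (i + 1), ih (s + x) 1]; omega

-- the cut either absorbs all of xs (then no boundaries are needed) or stops at an
-- element x, and bcount's remaining count is determined by x and the suffix
theorem cut_bcount (mid : Int) (l : List Int) :
    ∀ (s : Int),
      (cutLoop mid s 0 l = l.length ∧ bcount mid s l = some 0) ∨
      (∃ x rest, l.drop (cutLoop mid s 0 l) = x :: rest ∧
        bcount mid s l = (if mid < x then none else (bcount mid x rest).map (· + 1))) := by
  induction l with
  | nil => intro s; left; simp [cutLoop, bcount]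
  | cons x r ih =>
    intro s
    by_cases h : s + x > mid
    · right
      refine ⟨x, r, ?_, ?_⟩
      · simp [cutLoop, h]
      · simp only [bcount, if_neg (by omega : ¬ s + x ≤ mid), gt_iff_lt]
    · have hcut : cutLoop mid s 0 (x :: r) = 1 + cutLoop mid (s + x) 0 r := by
        simp only [cutLoop, if_neg h]
        exact cutLoop_shift mid r (s + x) 1
      have hbc : bcount mid s (x :: r) = bcount mid (s + x) r := by
        simp only [bcount, if_pos (by omega : s + x ≤ mid)]
      rcases ih (s + x) with ⟨hc, hb⟩ | ⟨y, rest, hd, hb⟩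
      · left
        constructor
        · rw [hcut, hc]; simp; omega
        · rw [hbc]; exact hb
      · right
        refine ⟨y, rest, ?_, ?_⟩
        · rw [hcut, Nat.add_comm, List.drop_succ_cons]
          exact hd
        · rw [hbc]; exact hb

-- head characterization of the cut: it is 0 exactly when the first element overflows
theorem cutLoop_zero_iff (mid x : Int) (r : List Int) :
    cutLoop mid 0 0 (x :: r) = 0 ↔ mid < x := by
  simp only [cutLoop, zero_add]
  split_ifs with h
  · simp; omega
  · rw [cutLoop_shift mid r x 1]
    constructor
    · intro hh; omega
    · intro hh; omega

-- nsegs counts one more than the boundaries of a fresh scan (for nonempty input)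
theorem nsegs_eq_bcount (mid : Int) :
    ∀ (N : Nat) (xs : List Int), xs.length ≤ N → xs ≠ [] →
      nsegs mid xs = (bcount mid 0 xs).map (fun b => 1 + b) := by
  intro N
  induction N with
  | zero =>
    intro xs hN hne
    cases xs with
    | nil => exact absurd rfl hne
    | cons x r => simp at hN
  | succ N ih =>
    intro xs hN hne
    cases xs with
    | nil => exact absurd rfl hne
    | cons x r =>
      rw [nsegs]
      simp only [List.isEmpty_cons]
      by_cases hc : cutLoop mid 0 0 (x :: r) = 0
      · rw [dif_pos hc]
        have hx : mid < x := (cutLoop_zero_iff mid x r).mp hc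
        have hnone : bcount mid 0 (x :: r) = none := by
          simp [bcount, hx]
        rw [hnone]; rfl
      · rw [dif_neg hc]
        rcases cut_bcount mid (x :: r) 0 with ⟨hcl, hb⟩ | ⟨y, rest, hd, hb⟩
        · -- the whole list is one segment
          rw [hcl, List.drop_length, nsegs]
          rw [hb]; rfl
        · -- the cut stops at y; the suffix y :: rest is strictly shorter
          set c := cutLoop mid 0 0 (x :: r) with hcdef
          have hcpos : 0 < c := Nat.pos_of_ne_zero hc
          have hlen : (y :: rest).length < (x :: r).length := by
            have hl := congrArg List.length hd
            rw [List.length_drop] at hl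
            simp only [List.length_cons] at hl ⊢
            omega
          have hfresh : bcount mid 0 ((x :: r).drop c) =
              (if mid < y then none else bcount mid y rest) := by
            rw [hd]
            simp only [bcount, zero_add]
            split_ifs with h1 h2 h2
            · omega
            · rfl
            · rfl
            · omega
          rw [ih ((x :: r).drop c) (by rw [hd]; omega) (by rw [hd]; simp), hb, hfresh]
          by_cases hy : mid < y
          · rw [if_pos hy, if_pos hy]; rfl
          · rw [if_neg hy, if_neg hy]
            cases hbr : bcount mid y rest with
            | none => rfl
            | some b => simp; omega

-- camping_alt over an arbitrary already-sliced list equals aRef from the initial state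
theorem aRef_eq_altResult (k mid : Int) (xs : List Int) :
    aRef k mid 0 0 xs =
      match nsegs mid xs with
      | none => false
      | some s => decide (max (s - 1) 0 ≤ k) := by
  cases hxs : xs with
  | nil => simp [aRef, nsegs]
  | cons x r =>
    rw [aRef_eq_bcount, nsegs_eq_bcount mid (x :: r).length (x :: r) le_rfl (by simp)]
    cases hb : bcount mid 0 (x :: r) with
    | none => rfl
    | some b =>
      have hb0 : 0 ≤ b := bcount_nonneg mid (x :: r) 0 b hb
      simp only [Option.map_some]
      have : max ((1 + b) - 1) 0 = b := by omega
      rw [this]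
      simp

-- with k < 0 both programs return false outright
theorem camping_eq_of_neg (n k : Int) (dist : List Int) (mid : Int) (hk : k < 0) :
    camping n k dist mid = camping_alt n k dist mid := by
  have hA : camping n k dist mid = false := by
    unfold camping
    by_cases h1 : (((0 : Nat) : Int)) = n
    · rw [campingLoop, dif_pos h1]; exact decide_eq_false (by omega)
    · rw [campingLoop, dif_neg h1, dif_pos (show ¬ (0 : Int) ≤ k by omega)]
      exact decide_eq_false (by omega)
  have hB : camping_alt n k dist mid = false := by
    unfold camping_alt
    cases hs : nsegs mid (PySem.List.slice dist none (some n)) with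
    | none => rfl
    | some s => simp; omega
  rw [hA, hB]

-- ===== VERDICT (by name: the statement is the Claim_ definition above) =====
theorem camping_spec : Claim_equal_camping := by
  intro n k dist mid _hdom hpre
  unfold Spec_camping
  rcases hpre with ⟨hn, hnl⟩ | hk
  · unfold camping camping_alt
    rw [PySem.List.slice_to (xs := dist) hn]
    rw [campingLoop_eq_aRef n k dist mid hn hnl 0 0 0 (by omega)]
    simpa using aRef_eq_altResult k mid (dist.take n.toNat)
  · exact camping_eq_of_neg n k dist mid hk
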